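-- pv_equiv track=rewrite | github.com/dhawal-mehta/DSA | String/Same Format String.py | solve
-- ===== SOURCE A (Python) =====
-- def solve( A, B):
--     j = 0
--     count_ = 0
--
--     if len(A) == 0 and len(B) != 0:
--         return 0
--
--     if len(A) == 0 and len(B) == 0:
--         return 1
--
--     for i in A:
--         if j == len(B):
--             break
--
--         if B[j] != i:
--             return 0
--
--         while(j < len(B) and B[j] == i):
--             j+=1
--
--         count_ += 1
--
--     if count_ != len(A) or j != len(B):
--         return 0
--
--     return 1
-- ===== SOURCE B (Python) =====
-- def solve(A, B):
--     # run-length decomposition of B first, then one flat comparison with A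
--     keys = []
--     for c in B:
--         if not keys or keys[-1] != c:
--             keys.append(c)
--     return 1 if keys == list(A) else 0
-- ===== Notes on version B (the rewrite author's own statement) =====
-- stated objective: idiomatic
-- what changed: Replaces the interleaved two-pointer scan (outer loop over A, inner while skipping a run of B) by first computing B's run-length keys in one pass and then comparing that key list to the characters of A.
import Mathlib
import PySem

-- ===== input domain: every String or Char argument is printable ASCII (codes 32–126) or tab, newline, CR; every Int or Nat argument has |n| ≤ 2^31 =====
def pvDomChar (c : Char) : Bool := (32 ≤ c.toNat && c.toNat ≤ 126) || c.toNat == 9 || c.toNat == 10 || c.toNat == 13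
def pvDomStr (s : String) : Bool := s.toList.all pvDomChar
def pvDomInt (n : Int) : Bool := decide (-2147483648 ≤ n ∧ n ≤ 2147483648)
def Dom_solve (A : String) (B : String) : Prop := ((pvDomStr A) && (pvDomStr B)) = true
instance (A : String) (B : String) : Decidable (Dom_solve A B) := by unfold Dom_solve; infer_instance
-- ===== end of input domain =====

-- B computes B's run-length keys in one pass and compares them to A's characters,
-- instead of A's interleaved two-pointer scan (objective: more idiomatic decomposition).

-- ===== PORT A =====
-- the inner `while (j < len(B) and B[j] == i): j += 1`
def pyWhile (b : List Char) (c : Char) (j : Nat) : Nat :=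
  if h : j < b.length then
    if b[j] = c then pyWhile b c (j + 1) else j
  else j
termination_by b.length - j

-- the `for i in A:` loop; `none` = the early `return 0`, `some (j, count_)` = loop finished/broke
def loopA (b : List Char) : List Char → Nat → Nat → Option (Nat × Nat)
  | [], j, count => some (j, count)
  | i :: rest, j, count =>
      if j = b.length then some (j, count)          -- break
      else if ¬ (b.getD j i = i) then none          -- B[j] != i  (j < len B here, so getD is exact)
      else loopA b rest (pyWhile b i j) (count + 1)

def solve (A : String) (B : String) : Int :=
  let a := A.toList
  let b := B.toList
  if a.length = 0 ∧ b.length ≠ 0 then 0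
  else if a.length = 0 ∧ b.length = 0 then 1
  else
    match loopA b a 0 0 with
    | none => 0
    | some (j, count) => if count ≠ a.length ∨ j ≠ b.length then 0 else 1

-- ===== PORT B =====
-- `keys`: the run-length keys of B, built by the single for-loop of Source B
def keysOf (b : List Char) : List Char :=
  b.foldl (fun ks c => if ks.getLast? = some c then ks else ks ++ [c]) []

def solve_alt (A : String) (B : String) : Int :=
  if keysOf B.toList = A.toList then 1 else 0

-- ===== PRECONDITION & SPEC =====
def Spec_solve (A : String) (B : String) (out : Int) : Prop := out = solve_alt A B
instance (A : String) (B : String) (out : Int) : Decidable (Spec_solve A B out) := by unfold Spec_solve; infer_instance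

-- ===== CLAIM (what is proved, stated in full; the proofs are below) =====
def Claim_equal_solve : Prop := ∀ (A : String) (B : String), Dom_solve A B → Spec_solve A B (solve A B)

-- ===== LEMMAS AND PROOFS =====

-- proof-side characterisation of the run keys
def recKeys : List Char → List Char
  | [] => []
  | c :: t => c :: recKeys (t.dropWhile (· = c))
termination_by l => l.length
decreasing_by
  simp only [List.length_cons]
  exact Nat.lt_succ_of_le (List.length_dropWhile_le _ _)

@[simp] theorem recKeys_nil : recKeys [] = [] := by rw [recKeys]

theorem recKeys_cons (c : Char) (t : List Char) :
    recKeys (c :: t) = c :: recKeys (t.dropWhile (· = c)) := by rw [recKeys]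

theorem foldKeys_aux (l : List Char) :
    ∀ (acc : List Char) (d : Char),
      l.foldl (fun ks c => if ks.getLast? = some c then ks else ks ++ [c]) (acc ++ [d])
        = acc ++ d :: recKeys (l.dropWhile (· = d)) := by
  induction l with
  | nil => intro acc d; simp
  | cons c t ih =>
      intro acc d
      by_cases h : c = d
      · subst h
        simp [List.foldl_cons, List.getLast?_concat, List.dropWhile]
        exact ih acc c
      · have hne : ¬ ((acc ++ [d]).getLast? = some c) := by
          simp [List.getLast?_concat]; exact fun e => h e.symm
        simp only [List.foldl_cons, if_neg hne, List.dropWhile]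
        have : decide (c = d) = false := by simp [h]
        rw [this]
        rw [recKeys_cons]
        simp only [List.append_assoc]
        have := ih (acc ++ [d]) c
        simpa using this

theorem keysOf_eq_recKeys (b : List Char) : keysOf b = recKeys b := by
  cases b with
  | nil => simp [keysOf]
  | cons c t =>
      have h := foldKeys_aux t [] c
      simp only [List.nil_append] at h
      simpa [keysOf, recKeys_cons] using h

theorem recKeys_nil_iff (b : List Char) : recKeys b = [] ↔ b = [] := by
  cases b with
  | nil => simp
  | cons c t => simp [recKeys_cons]

theorem pyWhile_drop (b : List Char) (c : Char) :
    ∀ (n j : Nat), b.length - j ≤ n → j ≤ b.length →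
      pyWhile b c j ≤ b.length ∧
      b.drop (pyWhile b c j) = (b.drop j).dropWhile (· = c) := by
  intro n
  induction n with
  | zero =>
      intro j hn hj
      have hj' : j = b.length := by omega
      subst hj'
      rw [pyWhile]
      simp
  | succ n ih =>
      intro j hn hj
      rw [pyWhile]
      by_cases h : j < b.length
      · rw [dif_pos h]
        have hdrop : b.drop j = b[j] :: b.drop (j + 1) := List.drop_eq_getElem_cons h
        by_cases he : b[j] = c
        · rw [if_pos he]
          have := ih (j + 1) (by omega) (by omega)
          refine ⟨this.1, ?_⟩
          rw [this.2, hdrop, List.dropWhile]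
          simp [he]
        · rw [if_neg he]
          refine ⟨le_of_lt h, ?_⟩
          rw [hdrop, List.dropWhile]
          simp [he]
      · rw [dif_neg h]
        have hj' : j = b.length := by omega
        subst hj'
        simp

theorem main_lemma (b : List Char) :
    ∀ (a : List Char) (j count : Nat), j ≤ b.length →
      (match loopA b a j count with
       | none => (0 : Int)
       | some (j', c') => if c' ≠ count + a.length ∨ j' ≠ b.length then 0 else 1)
      = (if recKeys (b.drop j) = a then 1 else 0) := by
  intro a
  induction a with
  | nil =>
      intro j count hj
      simp only [loopA, List.length_nil, Nat.add_zero]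
      by_cases h : j = b.length
      · subst h
        simp
      · have hlt : j < b.length := by omega
        have : b.drop j = b[j] :: b.drop (j + 1) := List.drop_eq_getElem_cons hlt
        rw [this, recKeys_cons]
        simp [h]
  | cons i rest ih =>
      intro j count hj
      simp only [loopA]
      by_cases h : j = b.length
      · rw [if_pos h]
        subst h
        simp
      · rw [if_neg h]
        have hlt : j < b.length := by omega
        have hdrop : b.drop j = b[j] :: b.drop (j + 1) := List.drop_eq_getElem_cons hlt
        have hgetD : b.getD j i = b[j] := by
          simp [List.getD, hlt]
        by_cases he : b[j] = i
        · have : ¬ ¬ (b.getD j i = i) := by rw [hgetD]; exact not_not_intro he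
          rw [if_neg this]
          have hw := pyWhile_drop b i (b.length - j) j (le_refl _) hj
          have hIH := ih (pyWhile b i j) (count + 1) hw.1
          have harith : count + 1 + rest.length = count + (i :: rest).length := by
            simp; omega
          rw [harith] at hIH
          rw [hIH]
          have hrw : b.drop (pyWhile b i j) = (b.drop (j + 1)).dropWhile (· = i) := by
            rw [hw.2, hdrop, List.dropWhile]
            simp [he]
          rw [hrw, hdrop, recKeys_cons, he]
          by_cases hk : recKeys ((b.drop (j + 1)).dropWhile (· = i)) = rest
          · simp [hk]
          · have : ¬ (i :: recKeys ((b.drop (j + 1)).dropWhile (· = i)) = i :: rest) := by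
              simp [hk]
            simp only [if_neg this]
            simp [hk]
        · have : ¬ (b.getD j i = i) := by rw [hgetD]; exact he
          rw [if_pos this]
          rw [hdrop, recKeys_cons]
          have : ¬ (b[j] :: recKeys ((b.drop (j + 1)).dropWhile (· = b[j])) = i :: rest) := by
            intro hcon
            exact he (List.cons.injEq .. ▸ hcon).1
          simp [this]

theorem solve_core (a b : List Char) :
    (if a.length = 0 ∧ b.length ≠ 0 then (0 : Int)
     else if a.length = 0 ∧ b.length = 0 then 1
     else
       match loopA b a 0 0 with
       | none => 0
       | some (j, count) => if count ≠ a.length ∨ j ≠ b.length then 0 else 1)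
      = (if recKeys b = a then 1 else 0) := by
  have hmain := main_lemma b a 0 0 (Nat.zero_le _)
  simp only [List.drop_zero, Nat.zero_add] at hmain
  by_cases ha : a = []
  · subst ha
    by_cases hb : b = []
    · subst hb; simp
    · have hbl : b.length ≠ 0 := by simpa using hb
      rw [if_pos ⟨rfl, hbl⟩]
      have : ¬ recKeys b = [] := by
        rw [recKeys_nil_iff]; exact hb
      simp [this]
  · have hlen : ¬ (a.length = 0 ∧ b.length ≠ 0) := by
      intro ⟨h1, _⟩; exact ha (List.length_eq_zero_iff.mp h1)
    have hlen2 : ¬ (a.length = 0 ∧ b.length = 0) := by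
      intro ⟨h1, _⟩; exact ha (List.length_eq_zero_iff.mp h1)
    rw [if_neg hlen, if_neg hlen2]
    exact hmain

theorem solve_eq (A B : String) : solve A B = solve_alt A B := by
  have h := solve_core A.toList B.toList
  unfold solve solve_alt
  rw [keysOf_eq_recKeys]
  exact h

-- ===== VERDICT (by name: the statement is the Claim_ definition above) =====
theorem solve_spec : Claim_equal_solve := by
  intro A B _
  unfold Spec_solve
  exact solve_eq A B
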